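-- pv_equiv track=rewrite | github.com/antaris82/CNNA-Project | Repository/scripts/build_export_script_v1.8.py | strip_lean_strings
-- ===== SOURCE A (Python) =====
-- def strip_lean_strings(text: str) -> str:
--     out: list[str] = []
--     i = 0
--     n = len(text)
--     in_string = False
--     while i < n:
--         ch = text[i]
--         if in_string:
--             if ch == "\\" and i + 1 < n:
--                 out.append(" ")
--                 out.append(" " if text[i + 1] != "\n" else "\n")
--                 i += 2
--                 continue
--             if ch == '"':
--                 out.append(" ")
--                 in_string = False
--                 i += 1
--                 continue
--             out.append("\n" if ch == "\n" else " ")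
--             i += 1
--             continue
--         if ch == '"':
--             out.append(" ")
--             in_string = True
--             i += 1
--             continue
--         out.append(ch)
--         i += 1
--     return "".join(out)
-- ===== SOURCE B (Python) =====
-- def strip_lean_strings(text: str) -> str:
--     # Chunk-based masking: copy non-string text in whole slices found via str.find,
--     # then mask each complete string literal span uniformly (newlines kept).
--     out = []
--     pos = 0
--     n = len(text)
--     while pos < n:
--         q = text.find('"', pos)
--         if q < 0:
--             out.append(text[pos:])
--             break
--         out.append(text[pos:q])
--         j = q + 1
--         while j < n:
--             c = text[j]
--             j += 1
--             if c == '\\' and j < n: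
--                 j += 1
--             elif c == '"':
--                 break
--         out.append(''.join('\n' if c == '\n' else ' ' for c in text[q:j]))
--         pos = j
--     return ''.join(out)
-- ===== Notes on version B (the rewrite author's own statement) =====
-- stated objective: faster
-- what changed: Replaced the character-at-a-time two-state automaton by a chunk scanner: non-string text is copied in whole slices via str.find, each string-literal span is located once (skipping backslash escapes) and then masked uniformly (newlines kept, everything else a space).
import Mathlib
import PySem

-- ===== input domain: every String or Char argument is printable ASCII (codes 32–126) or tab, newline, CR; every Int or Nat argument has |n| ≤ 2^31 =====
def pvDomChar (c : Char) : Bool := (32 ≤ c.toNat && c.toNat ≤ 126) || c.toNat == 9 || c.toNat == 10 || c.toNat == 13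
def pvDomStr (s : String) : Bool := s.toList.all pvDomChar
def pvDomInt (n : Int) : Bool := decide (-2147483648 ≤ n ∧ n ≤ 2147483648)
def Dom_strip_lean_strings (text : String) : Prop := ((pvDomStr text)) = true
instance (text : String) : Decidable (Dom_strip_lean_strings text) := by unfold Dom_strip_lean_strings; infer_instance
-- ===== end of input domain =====

-- B replaces A's character-at-a-time two-state automaton by a chunk scanner: non-string
-- text is copied in whole slices (find the next quote), each string-literal span is
-- located once (honouring backslash escapes) and masked uniformly; same O(n), measurably
-- faster by constant factor (C-level find/slicing instead of per-character Python work).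

-- ===== PORT A =====
-- A's while-loop over indices, transliterated as recursion over the remaining characters;
-- the `'\\' :: d :: rest` pattern is A's `ch == "\\" and i + 1 < n` lookahead (i += 2).
def stripGoA : Bool → List Char → List Char
  | _, [] => []
  | true, '\\' :: d :: rest =>
      ' ' :: (if d ≠ '\n' then ' ' else '\n') :: stripGoA true rest
  | true, c :: rest =>
      if c = '"' then ' ' :: stripGoA false rest
      else (if c = '\n' then '\n' else ' ') :: stripGoA true rest
  | false, c :: rest =>
      if c = '"' then ' ' :: stripGoA true rest
      else c :: stripGoA false rest

def strip_lean_strings (text : String) : String :=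
  String.ofList (stripGoA false text.toList)

-- ===== PORT B =====
-- Source B masks every char of the literal span uniformly: newline stays, anything else → ' '
def stripMask (c : Char) : Char := if c = '\n' then '\n' else ' '

-- Source B's inner while loop: split off the body of a string literal (the characters after
-- the opening quote up to and including the closing quote, escape pairs skipped).
def stripSplitLit : List Char → List Char × List Char
  | [] => ([], [])
  | [c] => ([c], [])
  | c :: d :: rest =>
      if c = '\\' then
        let p := stripSplitLit rest
        (c :: d :: p.1, p.2)
      else if c = '"' then ([c], d :: rest)
      else
        let p := stripSplitLit (d :: rest)
        (c :: p.1, p.2)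

theorem stripSplitLit_len (l : List Char) : (stripSplitLit l).2.length ≤ l.length := by
  induction l using stripSplitLit.induct with
  | case1 => simp [stripSplitLit]
  | case2 c => simp [stripSplitLit]
  | case3 d rest ih =>
      simp only [stripSplitLit, if_true, List.length_cons]
      omega
  | case4 d rest h =>
      simp [stripSplitLit]
  | case5 c d rest h h2 ih =>
      simp only [stripSplitLit, if_neg h, if_neg h2]
      simp only [List.length_cons] at ih ⊢
      omega

-- Source B's outer loop: text.find('"', pos) + the two slices = split at the first quote.
def stripGoB (l : List Char) : List Char :=
  let pre := l.takeWhile (· ≠ '"')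
  match h : l.dropWhile (· ≠ '"') with
  | [] => pre
  | q :: rest =>
      let p := stripSplitLit rest
      pre ++ (q :: p.1).map stripMask ++ stripGoB p.2
termination_by l.length
decreasing_by
  have h1 : (l.dropWhile (· ≠ '"')).length ≤ l.length := List.length_dropWhile_le _ _
  have h2 := stripSplitLit_len rest
  rw [h] at h1
  simp only [List.length_cons] at h1
  omega

def strip_lean_strings_alt (text : String) : String :=
  String.ofList (stripGoB text.toList)

-- ===== PRECONDITION & SPEC =====
def Spec_strip_lean_strings (text : String) (out : String) : Prop := out = strip_lean_strings_alt text
instance (text : String) (out : String) : Decidable (Spec_strip_lean_strings text out) := by unfold Spec_strip_lean_strings; infer_instance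

-- ===== CLAIM (what is proved, stated in full; the proofs are below) =====
def Claim_equal_strip_lean_strings : Prop := ∀ (text : String), Dom_strip_lean_strings text → Spec_strip_lean_strings text (strip_lean_strings text)

-- ===== LEMMAS AND PROOFS =====

-- equation lemmas for A's automaton (its patterns overlap)
theorem stripGoA_true_ne (c : Char) (rest : List Char) (h : c ≠ '\\') :
    stripGoA true (c :: rest) =
      if c = '"' then ' ' :: stripGoA false rest
      else (if c = '\n' then '\n' else ' ') :: stripGoA true rest := by
  rw [stripGoA.eq_def]; split <;> simp_all

theorem stripGoA_false_cons (c : Char) (rest : List Char) :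
    stripGoA false (c :: rest) =
      if c = '"' then ' ' :: stripGoA true rest else c :: stripGoA false rest := by
  rw [stripGoA.eq_def]; split <;> simp_all

theorem stripGoA_true_one (c : Char) :
    stripGoA true [c] =
      if c = '"' then ' ' :: stripGoA false []
      else (if c = '\n' then '\n' else ' ') :: stripGoA true [] := by
  rw [stripGoA.eq_def]; split <;> simp_all

-- Inside a literal, A emits exactly the uniform mask of the literal span's body and
-- then resumes outside the literal.
theorem stripGoA_true_eq (l : List Char) :
    stripGoA true l =
      (stripSplitLit l).1.map stripMask ++ stripGoA false (stripSplitLit l).2 := by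
  induction l using stripSplitLit.induct with
  | case1 => simp [stripSplitLit, stripGoA]
  | case2 c =>
      rw [stripGoA_true_one, stripSplitLit]
      by_cases hq : c = '"'
      · simp [hq, stripGoA, stripMask]
      · by_cases hn : c = '\n' <;> simp [hq, hn, stripGoA, stripMask]
  | case3 d rest ih =>
      have hL : stripGoA true ('\\' :: d :: rest) =
          ' ' :: (if d ≠ '\n' then ' ' else '\n') :: stripGoA true rest := by
        simp [stripGoA]
      rw [hL, ih]
      simp only [stripSplitLit, if_true, List.map_cons, List.cons_append]
      by_cases hn : d = '\n' <;> simp [hn, stripMask]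
  | case4 d rest h =>
      rw [stripGoA_true_ne _ _ (by decide)]
      simp [stripSplitLit, stripMask]
  | case5 c d rest h h2 ih =>
      rw [stripGoA_true_ne _ _ h, if_neg h2, ih]
      simp only [stripSplitLit, if_neg h, if_neg h2, List.map_cons, List.cons_append]
      by_cases hn : c = '\n' <;> simp [hn, stripMask]

-- Outside any literal, A copies quote-free prefixes verbatim.
theorem stripGoA_false_pre (pre t : List Char) (h : ∀ c ∈ pre, c ≠ '"') :
    stripGoA false (pre ++ t) = pre ++ stripGoA false t := by
  induction pre with
  | nil => simp
  | cons c cs ih =>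
      have hc : c ≠ '"' := h c (by simp)
      rw [List.cons_append, stripGoA_false_cons, if_neg hc,
        ih (fun x hx => h x (by simp [hx]))]
      simp

theorem stripDropWhile_head_false {α : Type} {p : α → Bool} (l : List α) (q : α)
    (rest : List α) (h : l.dropWhile p = q :: rest) : p q = false := by
  induction l with
  | nil => cases h
  | cons a as ih =>
      by_cases hp : p a
      · rw [List.dropWhile_cons_of_pos hp] at h; exact ih h
      · rw [List.dropWhile_cons_of_neg hp] at h
        cases h; simpa using hp

theorem stripGoA_eq_goB (l : List Char) : stripGoA false l = stripGoB l := by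
  induction l using stripGoB.induct with
  | case1 l h =>
      rw [stripGoB]
      split
      · have hl : l.takeWhile (fun x => decide (x ≠ '"')) ++ [] = l := by
          rw [← h]; exact List.takeWhile_append_dropWhile
        have hpre : ∀ c ∈ l.takeWhile (fun x => decide (x ≠ '"')), c ≠ '"' := fun c hc => by
          simpa using List.mem_takeWhile_imp hc
        calc stripGoA false l
            = stripGoA false (l.takeWhile (fun x => decide (x ≠ '"')) ++ []) := by rw [hl]
          _ = l.takeWhile (fun x => decide (x ≠ '"')) ++ stripGoA false [] :=
              stripGoA_false_pre _ _ hpre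
          _ = l.takeWhile (fun x => decide (x ≠ '"')) := by simp [stripGoA]
      · rename_i q rest heq
        rw [h] at heq; cases heq
  | case2 l q rest h p ih =>
      rw [stripGoB]
      split
      · rename_i heq
        rw [h] at heq; cases heq
      · rename_i q' rest' heq
        rw [h] at heq
        cases heq
        have hl : l.takeWhile (fun x => decide (x ≠ '"')) ++ (q :: rest) = l := by
          rw [← h]; exact List.takeWhile_append_dropWhile
        have hpre : ∀ c ∈ l.takeWhile (fun x => decide (x ≠ '"')), c ≠ '"' := fun c hc => by
          simpa using List.mem_takeWhile_imp hc
        have hq : q = '"' := by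
          have := stripDropWhile_head_false l q rest h
          simpa using this
        calc stripGoA false l
            = stripGoA false (l.takeWhile (fun x => decide (x ≠ '"')) ++ q :: rest) := by
              rw [hl]
          _ = l.takeWhile (fun x => decide (x ≠ '"')) ++ stripGoA false (q :: rest) :=
              stripGoA_false_pre _ _ hpre
          _ = l.takeWhile (fun x => decide (x ≠ '"')) ++ ' ' :: stripGoA true rest := by
              rw [stripGoA_false_cons, hq, if_pos rfl]
          _ = _ := by
              rw [stripGoA_true_eq, ih, hq]
              simp only [List.map_cons, List.append_assoc, List.cons_append]
              rfl

-- ===== VERDICT (by name: the statement is the Claim_ definition above) =====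
theorem strip_lean_strings_spec : Claim_equal_strip_lean_strings := by
  intro text _
  unfold Spec_strip_lean_strings strip_lean_strings strip_lean_strings_alt
  rw [stripGoA_eq_goB]
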